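-- pv_equiv track=rewrite | github.com/JinnZ2/PhysicsGuard | core/premise_parser.py | _find_negated_keywords
-- ===== SOURCE A (Python) =====
-- NEGATION_WORDS = {"not", "no", "never", "without", "cannot", "can't", "doesn't", "isn't", "won't"}
--
-- def _stem_match(word, keyword):
--     """Check if word and keyword share a stem (prefix match in either direction)."""
--     return len(word) >= 3 and len(keyword) >= 3 and (word.startswith(keyword) or keyword.startswith(word))
--
-- def _find_negated_keywords(words, keywords):
--     """Find keywords preceded by a negation word within a 4-word window."""
--     negated = []
--     for i, w in enumerate(words):
--         if w in NEGATION_WORDS: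
--             for j in range(i + 1, min(i + 5, len(words))):
--                 for kw in keywords:
--                     if _stem_match(words[j], kw) and kw not in negated:
--                         negated.append(kw)
--     return negated
-- ===== SOURCE B (Python) =====
-- NEGATION_WORDS = {"not", "no", "never", "without", "cannot", "can't", "doesn't", "isn't", "won't"}
--
-- def _stem_match(word, keyword):
--     """Check if word and keyword share a stem (prefix match in either direction)."""
--     return len(word) >= 3 and len(keyword) >= 3 and (word.startswith(keyword) or keyword.startswith(word))
--
-- def _find_negated_keywords(words, keywords):
--     """Single left-to-right pass: track the index of the most recent negation word;
--     a word is in a negation window iff it is at most 4 positions after that index."""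
--     negated = []
--     last = None
--     for j, w in enumerate(words):
--         if last is not None and j - last <= 4:
--             for kw in keywords:
--                 if _stem_match(w, kw) and kw not in negated:
--                     negated.append(kw)
--         if w in NEGATION_WORDS:
--             last = j
--     return negated
-- ===== Notes on version B (the rewrite author's own statement) =====
-- stated objective: alternative
-- what changed: Replaced A's nested loops (for each negation word, rescan its 4-word window and the keyword list, with indexed access) by a single left-to-right pass that tracks the index of the most recent negation word and runs the keyword matcher directly on the current word when it lies within 4 positions of it; the ordered first-seen dedup of keywords is kept.
import Mathlib
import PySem

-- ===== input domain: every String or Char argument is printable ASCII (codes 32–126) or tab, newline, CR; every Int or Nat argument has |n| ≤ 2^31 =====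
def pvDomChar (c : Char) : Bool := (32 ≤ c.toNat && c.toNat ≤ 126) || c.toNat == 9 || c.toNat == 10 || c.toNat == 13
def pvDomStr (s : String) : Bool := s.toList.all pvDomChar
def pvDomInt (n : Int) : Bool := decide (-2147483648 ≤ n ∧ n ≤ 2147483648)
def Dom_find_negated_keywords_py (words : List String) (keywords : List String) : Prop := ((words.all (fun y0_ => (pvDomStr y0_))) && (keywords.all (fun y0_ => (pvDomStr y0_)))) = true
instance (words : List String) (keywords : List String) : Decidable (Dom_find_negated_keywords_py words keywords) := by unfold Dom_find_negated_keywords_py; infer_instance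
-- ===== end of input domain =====

-- B replaces A's negation-outer/window-inner triple loop by a single left-to-right pass
-- that tracks the index of the most recent negation word (objective: alternative decomposition).

-- ===== PORT A =====
-- module constant NEGATION_WORDS (a Python set of distinct literals)
def pyNegationWords : List String :=
  ["not", "no", "never", "without", "cannot", "can't", "doesn't", "isn't", "won't"]

-- helper _stem_match (shared by the module, used by both A and B)
def stem_match_py (word : String) (keyword : String) : Bool :=
  decide (3 ≤ PySem.Str.len word) && decide (3 ≤ PySem.Str.len keyword) &&
    (PySem.Str.startswith word keyword || PySem.Str.startswith keyword word)

def find_negated_keywords_py (words : List String) (keywords : List String) : List String :=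
  (PySem.List.enumerate words).foldl (fun negated iw =>
    if pyNegationWords.contains iw.2 then
      (PySem.List.pyRange (iw.1 + 1) (min (iw.1 + 5) (PySem.List.len words))).foldl
        (fun acc j =>
          keywords.foldl (fun acc2 kw =>
            if stem_match_py (PySem.List.pyGetD words j "") kw && !acc2.contains kw then
              acc2 ++ [kw]
            else acc2) acc) negated
    else negated) []

-- ===== PORT B =====
def find_negated_keywords_py_alt (words : List String) (keywords : List String) : List String :=
  ((PySem.List.enumerate words).foldl (fun st jw =>
      let negated :=
        if (match st.2 with
            | some last => decide (jw.1 - last ≤ 4)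
            | none => false) then
          keywords.foldl (fun acc kw =>
            if stem_match_py jw.2 kw && !acc.contains kw then acc ++ [kw] else acc) st.1
        else st.1
      (negated, if pyNegationWords.contains jw.2 then some jw.1 else st.2))
    (([] : List String), (none : Option ℤ))).1

-- ===== PRECONDITION & SPEC =====
def Spec_find_negated_keywords_py (words : List String) (keywords : List String) (out : List String) : Prop := out = find_negated_keywords_py_alt words keywords
instance (words : List String) (keywords : List String) (out : List String) : Decidable (Spec_find_negated_keywords_py words keywords out) := by unfold Spec_find_negated_keywords_py; infer_instance

-- ===== CLAIM (what is proved, stated in full; the proofs are below) =====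
def Claim_equal_find_negated_keywords_py : Prop := ∀ (words : List String) (keywords : List String), Dom_find_negated_keywords_py words keywords → Spec_find_negated_keywords_py words keywords (find_negated_keywords_py words keywords)

-- ===== LEMMAS AND PROOFS =====

-- word j of `words` (with "" past the end; only positions < length are ever relevant)
def wd (words : List String) (j : ℕ) : String := words.getD j ""

def isNeg (words : List String) (j : ℕ) : Bool := pyNegationWords.contains (wd words j)

-- the shared inner keyword loop (ordered dedup append)
def add1 (keywords : List String) (w : String) (acc : List String) : List String :=
  keywords.foldl (fun a kw => if stem_match_py w kw && !a.contains kw then a ++ [kw] else a) acc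

def stepP (words keywords : List String) (acc : List String) (j : ℕ) : List String :=
  add1 keywords (wd words j) acc

-- A's window after a negation at i
def win (i n : ℕ) : List ℕ := List.range' (i + 1) (min (i + 5) n - (i + 1))

-- j lies in the window of SOME negation word (Bool, bounded search)
def covb (words : List String) (j : ℕ) : Bool :=
  (List.range j).any (fun i => decide (j ≤ i + 4) && isNeg words i)

-- j lies in the window of some negation word at an index < m
def covBb (words : List String) (m j : ℕ) : Bool :=
  (List.range m).any (fun i => decide (i < j) && decide (j ≤ i + 4) && isNeg words i)

-- acc already contains every keyword matching word j
def sat (words keywords acc : List String) (j : ℕ) : Prop :=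
  ∀ kw ∈ keywords, stem_match_py (wd words j) kw = true → kw ∈ acc

-- the common canonical form both ports are reduced to
def canon (words keywords : List String) : List String :=
  ((List.range words.length).filter (fun j => covb words j)).foldl (stepP words keywords) []

lemma covb_iff (words : List String) (j : ℕ) :
    covb words j = true ↔ ∃ i, i < j ∧ j ≤ i + 4 ∧ isNeg words i = true := by
  simp [covb, List.any_eq_true, List.mem_range]

lemma covBb_iff (words : List String) (m j : ℕ) :
    covBb words m j = true ↔ ∃ i, i < m ∧ i < j ∧ j ≤ i + 4 ∧ isNeg words i = true := by
  simp [covBb, List.any_eq_true, List.mem_range, and_assoc]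

lemma isNeg_lt (words : List String) (i : ℕ) (h : isNeg words i = true) : i < words.length := by
  by_contra hn
  rw [isNeg, wd, List.getD_eq_default _ _ (by omega)] at h
  exact absurd h (by decide)

lemma mem_add1 (keywords : List String) (w : String) {acc : List String} {x : String}
    (h : x ∈ acc) : x ∈ add1 keywords w acc := by
  induction keywords generalizing acc with
  | nil => exact h
  | cons kw kws ih =>
    simp only [add1, List.foldl_cons]
    split
    · exact ih (by simp [h])
    · exact ih h

lemma add1_sat (keywords : List String) (w : String) (acc : List String) :
    ∀ kw ∈ keywords, stem_match_py w kw = true → kw ∈ add1 keywords w acc := by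
  induction keywords generalizing acc with
  | nil => simp
  | cons kw kws ih =>
    intro k hk hs
    simp only [add1, List.foldl_cons]
    rcases List.mem_cons.mp hk with rfl | hk
    · by_cases hc : acc.contains k = true
      · have hif : (if stem_match_py w k && !acc.contains k then acc ++ [k] else acc) = acc := by
          rw [hc]
          simp
        rw [hif]
        exact mem_add1 _ _ (List.contains_iff_mem.mp hc)
      · have hif : (if stem_match_py w k && !acc.contains k then acc ++ [k] else acc)
            = acc ++ [k] := by
          rw [Bool.eq_false_iff.mpr hc, hs]
          simp
        rw [hif]
        exact mem_add1 _ _ (by simp)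
    · exact ih _ k hk hs

lemma add1_noop (keywords : List String) (w : String) (acc : List String)
    (h : ∀ kw ∈ keywords, stem_match_py w kw = true → kw ∈ acc) :
    add1 keywords w acc = acc := by
  induction keywords with
  | nil => rfl
  | cons kw kws ih =>
    simp only [add1, List.foldl_cons]
    have hif : (if stem_match_py w kw && !acc.contains kw then acc ++ [kw] else acc) = acc := by
      by_cases hs : stem_match_py w kw = true
      · have hm : kw ∈ acc := h kw (by simp) hs
        rw [List.contains_iff_mem.mpr hm]
        simp
      · rw [Bool.eq_false_iff.mpr hs]
        simp
    rw [hif]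
    exact ih (fun k hk hs => h k (by simp [hk]) hs)

lemma mem_foldl_step (words keywords : List String) (s : List ℕ) {acc : List String} {x : String}
    (h : x ∈ acc) : x ∈ s.foldl (stepP words keywords) acc := by
  induction s generalizing acc with
  | nil => exact h
  | cons a s ih => exact ih (mem_add1 _ _ h)

lemma sat_foldl_step (words keywords : List String) (s : List ℕ) {acc : List String} {j : ℕ}
    (h : sat words keywords acc j) : sat words keywords (s.foldl (stepP words keywords) acc) j :=
  fun kw hk hs => mem_foldl_step words keywords s (h kw hk hs)

lemma foldl_sat_of_mem (words keywords : List String) (s : List ℕ) (acc : List String) {j : ℕ}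
    (h : j ∈ s) : sat words keywords (s.foldl (stepP words keywords) acc) j := by
  induction s generalizing acc with
  | nil => cases h
  | cons a s ih =>
    rcases List.mem_cons.mp h with rfl | h
    · by_cases hj : j ∈ s
      · exact ih _ hj
      · exact sat_foldl_step words keywords s
          (fun kw hk hs => add1_sat keywords (wd words j) acc kw hk hs)
    · exact ih _ h

lemma sat_of_ge_len (words keywords acc : List String) {j : ℕ} (h : words.length ≤ j) :
    sat words keywords acc j := by
  intro kw hk hs
  rw [wd, List.getD_eq_default _ _ h] at hs
  simp [stem_match_py, PySem.Str.len_eq] at hs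

-- skip positions already saturated
lemma foldl_skip (words keywords : List String) (p : ℕ → Bool) :
    ∀ (s : List ℕ) (acc : List String),
      (∀ j ∈ s, p j = true → sat words keywords acc j) →
      s.foldl (stepP words keywords) acc
        = (s.filter (fun j => !p j)).foldl (stepP words keywords) acc := by
  intro s
  induction s with
  | nil => intro acc _; rfl
  | cons a s ih =>
    intro acc h
    by_cases hp : p a = true
    · have hsat := h a (by simp) hp
      have hf : List.filter (fun j => !p j) (a :: s) = List.filter (fun j => !p j) s := by
        simp [hp]
      rw [hf, List.foldl_cons, stepP, add1_noop _ _ _ hsat]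
      exact ih acc (fun j hj hpj => h j (by simp [hj]) hpj)
    · have hf : List.filter (fun j => !p j) (a :: s) = a :: List.filter (fun j => !p j) s := by
        simp [Bool.eq_false_iff.mpr hp]
      rw [hf, List.foldl_cons, List.foldl_cons]
      exact ih _ (fun j hj hpj =>
        fun kw hk hs => mem_add1 _ _ (h j (by simp [hj]) hpj kw hk hs))

-- a fold with a guard is a fold over the filtered list
lemma foldl_if_filter {α : Type} (p : ℕ → Bool) (g : α → ℕ → α) :
    ∀ (s : List ℕ) (acc : α),
      s.foldl (fun acc i => if p i then g acc i else acc) acc = (s.filter p).foldl g acc := by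
  intro s
  induction s with
  | nil => intro acc; rfl
  | cons a s ih =>
    intro acc
    by_cases hp : p a = true
    · simp [hp, ih]
    · simp [Bool.eq_false_iff.mpr hp, ih]

lemma mem_win {i n j : ℕ} : j ∈ win i n ↔ i < j ∧ j ≤ i + 4 ∧ j < n := by
  rw [win, List.mem_range'_1]
  omega

-- A's port, re-expressed over natural indices
lemma A_eq_nat (words keywords : List String) :
    find_negated_keywords_py words keywords
      = (List.range words.length).foldl
          (fun acc i => if isNeg words i then (win i words.length).foldl (stepP words keywords) acc
            else acc) [] := by
  rw [find_negated_keywords_py, PySem.List.enumerate_eq_map_pyRange words "",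
    PySem.List.pyRange_one, List.foldl_map, List.foldl_map]
  simp only [PySem.List.len_eq, Int.sub_zero, Int.toNat_natCast, zero_add]
  apply List.foldl_ext
  intro acc i _
  simp only [PySem.List.pyGetD_natCast]
  simp only [isNeg, wd]
  congr 1
  have hmin : min ((i : ℤ) + 5) (words.length : ℤ) = ((min (i + 5) words.length : ℕ) : ℤ) := by
    rw [Nat.cast_min]; push_cast; ring_nf
  rw [PySem.List.pyRange_one, hmin, List.foldl_map,
    show ((i:ℤ) + 1 = ((i + 1 : ℕ) : ℤ)) from by push_cast; ring,
    show ((((min (i + 5) words.length : ℕ)) : ℤ) - ((i + 1 : ℕ) : ℤ)).toNat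
      = min (i + 5) words.length - (i + 1) from Int.toNat_sub _ _,
    win, List.range'_eq_map_range, List.foldl_map]
  apply List.foldl_ext
  intro acc2 k _
  have hidx : PySem.List.pyGetD words ((((i + 1 : ℕ) : ℤ)) + (k : ℤ)) ""
      = words.getD (i + 1 + k) "" := by
    rw [show ((((i + 1 : ℕ) : ℤ)) + (k : ℤ)) = (((i + 1 + k : ℕ)) : ℤ) from by push_cast; ring]
    exact PySem.List.pyGetD_natCast ..
  rw [stepP, add1, wd, hidx]

-- sorted-lists-with-equal-membership are equal
lemma eq_of_mem_pairwise {l1 l2 : List ℕ} (h1 : l1.Pairwise (· < ·)) (h2 : l2.Pairwise (· < ·))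
    (h : ∀ x, x ∈ l1 ↔ x ∈ l2) : l1 = l2 := by
  have nd1 : l1.Nodup := h1.imp Nat.ne_of_lt
  have nd2 : l2.Nodup := h2.imp Nat.ne_of_lt
  exact ((List.perm_ext_iff_of_nodup nd1 nd2).mpr h).eq_of_pairwise
    (fun a b _ _ hab hba => absurd hba (Nat.lt_asymm hab)) h1 h2

-- the key invariant induction for A: processing the remaining negation indices l (all ≥ m,
-- complete above m) from an acc saturated on all positions negated before m yields the fold
-- over the still-uncovered negated positions in ascending order
lemma keyA (words keywords : List String) :
    ∀ (l : List ℕ) (m : ℕ) (acc : List String),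
      l.Pairwise (· < ·) →
      (∀ i ∈ l, isNeg words i = true ∧ m ≤ i) →
      (∀ i, m ≤ i → isNeg words i = true → i ∈ l) →
      (∀ j, covBb words m j = true → sat words keywords acc j) →
      l.foldl (fun acc i => (win i words.length).foldl (stepP words keywords) acc) acc
        = ((List.range words.length).filter
            (fun j => covb words j && !covBb words m j)).foldl (stepP words keywords) acc := by
  intro l
  induction l with
  | nil =>
    intro m acc _ _ hcomp _
    have : ((List.range words.length).filter (fun j => covb words j && !covBb words m j)) = [] := by
      rw [List.filter_eq_nil_iff]
      intro j _ hj
      rw [Bool.and_eq_true, covb_iff, Bool.not_eq_eq_eq_not, Bool.not_true,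
        Bool.eq_false_iff, Ne, covBb_iff] at hj
      obtain ⟨⟨i, hij, hji, hneg⟩, hnb⟩ := hj
      by_cases him : m ≤ i
      · exact absurd (hcomp i him hneg) (by simp)
      · exact hnb ⟨i, by omega, hij, hji, hneg⟩
    simp [this]
  | cons i rest ih =>
    intro m acc hpw hmem hcomp hsat
    have hneg_i : isNeg words i = true := (hmem i (by simp)).1
    have hmi : m ≤ i := (hmem i (by simp)).2
    have hin : i < words.length := isNeg_lt words i hneg_i
    have hrest_lt : ∀ r ∈ rest, i < r := fun r hr => (List.pairwise_cons.mp hpw).1 r hr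
    -- no negation index in [m, i)
    have hminimal : ∀ i', m ≤ i' → i' < i → isNeg words i' = false := by
      intro i' h1 h2
      by_contra hne
      rw [Bool.not_eq_false] at hne
      rcases List.mem_cons.mp (hcomp i' h1 hne) with rfl | hmem'
      · omega
      · exact absurd (hrest_lt i' hmem') (by omega)
    -- covBb (i+1) decomposition
    have hcovB_succ : ∀ j, covBb words (i + 1) j = true ↔
        (covBb words m j = true ∨ (i < j ∧ j ≤ i + 4)) := by
      intro j
      rw [covBb_iff, covBb_iff]
      constructor
      · rintro ⟨i', h1, h2, h3, h4⟩
        by_cases him' : i' < m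
        · exact Or.inl ⟨i', him', h2, h3, h4⟩
        · have : i' = i := by
            by_contra hne
            have := hminimal i' (by omega) (by omega)
            simp [this] at h4
          subst this
          exact Or.inr ⟨h2, h3⟩
      · rintro (⟨i', h1, h2, h3, h4⟩ | ⟨h1, h2⟩)
        · exact ⟨i', by omega, h2, h3, h4⟩
        · exact ⟨i, by omega, h1, h2, hneg_i⟩
    simp only [List.foldl_cons]
    rw [foldl_skip words keywords (fun j => covBb words m j) (win i words.length) acc
      (fun j hj hpj => hsat j hpj)]
    set acc' := ((win i words.length).filter
      (fun j => !covBb words m j)).foldl (stepP words keywords) acc with hacc'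
    rw [ih (i + 1) acc'
      (List.pairwise_cons.mp hpw).2
      (fun r hr => ⟨(hmem r (by simp [hr])).1, by have := hrest_lt r hr; omega⟩)
      (fun i' h1 h2 => by
        rcases List.mem_cons.mp (hcomp i' (by omega) h2) with rfl | h
        · omega
        · exact h)
      (fun j hj => by
        rcases (hcovB_succ j).mp hj with hB | ⟨h1, h2⟩
        · exact sat_foldl_step words keywords _ (hsat j hB)
        · by_cases hjn : j < words.length
          · by_cases hB : covBb words m j = true
            · exact sat_foldl_step words keywords _ (hsat j hB)
            · exact foldl_sat_of_mem words keywords _ acc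
                (List.mem_filter.mpr ⟨mem_win.mpr ⟨h1, h2, hjn⟩, by simp [hB]⟩)
          · exact sat_of_ge_len words keywords _ (by omega))]
    rw [hacc', ← List.foldl_append]
    congr 1
    -- list identity: uncovered-after-m = (new part of window i) ++ uncovered-after-(i+1)
    apply eq_of_mem_pairwise
    · apply List.pairwise_append.mpr
      refine ⟨List.Pairwise.filter _ (List.pairwise_lt_range' ..), List.Pairwise.filter _ List.pairwise_lt_range, ?_⟩
      intro a ha b hb
      have ha' := List.mem_filter.mp ha
      have hb' := List.mem_filter.mp hb
      have ha2 := mem_win.mp ha'.1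
      have hb2 : covb words b = true ∧ covBb words (i+1) b ≠ true := by
        have := hb'.2
        rw [Bool.and_eq_true, Bool.not_eq_eq_eq_not, Bool.not_true, Bool.eq_false_iff] at this
        exact this
      obtain ⟨i', h1, h2, h3⟩ := (covb_iff words b).mp hb2.1
      have hi' : ¬ i' < i + 1 := fun hlt => hb2.2 ((covBb_iff words _ _).mpr ⟨i', hlt, h1, h2, h3⟩)
      have hbig : ¬ (i < b ∧ b ≤ i + 4) := fun ⟨u, v⟩ =>
        hb2.2 ((covBb_iff words _ _).mpr ⟨i, by omega, u, v, hneg_i⟩)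
      omega
    · exact List.Pairwise.filter _ List.pairwise_lt_range
    · intro x
      rw [Iff.comm]
      simp only [List.mem_append, List.mem_filter, List.mem_range, Bool.and_eq_true,
        Bool.not_eq_eq_eq_not, Bool.not_true, Bool.eq_false_iff, Ne, mem_win]
      constructor
      · rintro ⟨hxn, hcov, hnB⟩
        by_cases hs : covBb words (i + 1) x = true
        · rcases (hcovB_succ x).mp hs with hB | ⟨h1, h2⟩
          · exact absurd hB hnB
          · exact Or.inl ⟨⟨h1, h2, hxn⟩, hnB⟩
        · exact Or.inr ⟨hxn, hcov, hs⟩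
      · rintro (⟨⟨h1, h2, h3⟩, hnB⟩ | ⟨hxn, hcov, hnS⟩)
        · exact ⟨h3, (covb_iff words x).mpr ⟨i, h1, h2, hneg_i⟩, hnB⟩
        · exact ⟨hxn, hcov, fun hB => hnS ((hcovB_succ x).mpr (Or.inl hB))⟩

lemma A_eq_canon (words keywords : List String) :
    find_negated_keywords_py words keywords = canon words keywords := by
  rw [A_eq_nat, foldl_if_filter]
  rw [keyA words keywords ((List.range words.length).filter (fun i => isNeg words i)) 0 []
    (List.Pairwise.filter _ List.pairwise_lt_range)
    (fun i hi => ⟨(List.mem_filter.mp hi).2, Nat.zero_le i⟩)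
    (fun i _ hneg => List.mem_filter.mpr ⟨List.mem_range.mpr (isNeg_lt words i hneg), hneg⟩)
    (fun j hj => by rw [covBb_iff] at hj; obtain ⟨i, h, _⟩ := hj; omega)]
  rw [canon]
  congr 1
  apply List.filter_congr
  intro j _
  have : covBb words 0 j = false := by
    rw [Bool.eq_false_iff, Ne, covBb_iff]
    rintro ⟨i, h, _⟩
    omega
  simp [this]

-- ===== B side =====

def bstep (words keywords : List String) (st : List String × Option ℤ) (j : ℕ) :
    List String × Option ℤ :=
  ((if (match st.2 with
        | some last => decide ((j : ℤ) - last ≤ 4)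
        | none => false) then add1 keywords (wd words j) st.1 else st.1),
   if isNeg words j then some (j : ℤ) else st.2)

-- B's port, re-expressed over natural indices
lemma B_eq_nat (words keywords : List String) :
    find_negated_keywords_py_alt words keywords
      = ((List.range words.length).foldl (bstep words keywords) ([], none)).1 := by
  rw [find_negated_keywords_py_alt, PySem.List.enumerate_eq_map_pyRange words "",
    PySem.List.pyRange_one, List.foldl_map, List.foldl_map]
  simp only [PySem.List.len_eq, Int.sub_zero, Int.toNat_natCast, zero_add]
  congr 1
  apply List.foldl_ext
  intro st j _
  simp only [PySem.List.pyGetD_natCast, bstep]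
  rfl

-- st.2 is the index of the most recent negation word among the first m
def lastInv (words : List String) (o : Option ℤ) (m : ℕ) : Prop :=
  (o = none ∧ ∀ i < m, isNeg words i = false) ∨
  (∃ i : ℕ, o = some (i : ℤ) ∧ i < m ∧ isNeg words i = true ∧
    ∀ i', i < i' → i' < m → isNeg words i' = false)

lemma keyB (words keywords : List String) :
    ∀ (m : ℕ),
      ((List.range m).foldl (bstep words keywords) ([], none)).1
        = ((List.range m).filter (fun j => covb words j)).foldl (stepP words keywords) []
      ∧ lastInv words ((List.range m).foldl (bstep words keywords) ([], none)).2 m := by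
  intro m
  induction m with
  | zero => exact ⟨rfl, Or.inl ⟨rfl, by omega⟩⟩
  | succ m ih =>
    obtain ⟨ih1, ih2⟩ := ih
    rw [List.range_succ, List.foldl_append, List.filter_append, List.foldl_append]
    set st := ((List.range m).foldl (bstep words keywords) ([], none)) with hst
    -- the guard tests exactly coverage of position m
    have hcond : (match st.2 with
        | some last => decide ((m : ℤ) - last ≤ 4)
        | none => false) = covb words m := by
      rcases ih2 with ⟨hnone, hall⟩ | ⟨i, hsome, him, hneg, hmax⟩
      · rw [hnone]
        have : covb words m = false := by
          rw [Bool.eq_false_iff, Ne, covb_iff]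
          rintro ⟨i, h1, _, h3⟩
          simp [hall i h1] at h3
        simp [this]
      · rw [hsome]
        by_cases hle : m ≤ i + 4
        · have : covb words m = true := (covb_iff words m).mpr ⟨i, him, hle, hneg⟩
          rw [this]
          simp only [decide_eq_true_eq]
          omega
        · have : covb words m = false := by
            rw [Bool.eq_false_iff, Ne, covb_iff]
            rintro ⟨i', h1, h2, h3⟩
            have : i < i' := by omega
            simp [hmax i' this h1] at h3
          rw [this]
          simp only [decide_eq_false_iff_not]
          omega
    constructor
    · simp only [List.foldl_cons, List.foldl_nil, bstep, hcond, ih1]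
      by_cases hc : covb words m = true
      · simp [hc, stepP]
      · simp [Bool.eq_false_iff.mpr hc]
    · simp only [List.foldl_cons, List.foldl_nil, bstep]
      by_cases hn : isNeg words m = true
      · simp only [hn]
        exact Or.inr ⟨m, rfl, by omega, hn, by omega⟩
      · rw [Bool.eq_false_iff.mpr hn]
        simp only [Bool.false_eq_true, if_false]
        rcases ih2 with ⟨hnone, hall⟩ | ⟨i, hsome, him, hneg, hmax⟩
        · refine Or.inl ⟨hnone, fun i hi => ?_⟩
          by_cases hi' : i < m
          · exact hall i hi'
          · have : i = m := by omega
            subst this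
            exact Bool.eq_false_iff.mpr hn
        · refine Or.inr ⟨i, hsome, by omega, hneg, fun i' h1 h2 => ?_⟩
          by_cases hi' : i' < m
          · exact hmax i' h1 hi'
          · have : i' = m := by omega
            subst this
            exact Bool.eq_false_iff.mpr hn

lemma B_eq_canon (words keywords : List String) :
    find_negated_keywords_py_alt words keywords = canon words keywords := by
  rw [B_eq_nat, (keyB words keywords words.length).1, canon]

-- ===== VERDICT (by name: the statement is the Claim_ definition above) =====
theorem find_negated_keywords_py_spec : Claim_equal_find_negated_keywords_py := by
  intro words keywords _
  rw [Spec_find_negated_keywords_py, A_eq_canon, B_eq_canon]
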